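-- pv_equiv track=rewrite | github.com/felipeganho/signals-and-systems | Lab002/ex03 - Felipe Silva Ganho.py | sinal_x
-- ===== SOURCE A (Python) =====
-- def sinal_x(n0, sinal):
--     u = []
--
--     for i in range(-10, 101):
--         if i >= n0:
--             if sinal == 1:
--                 u.append(1)
--             else:
--                 u.append(-1)
--         else:
--             u.append(0)
--
--     return u
-- ===== SOURCE B (Python) =====
-- def sinal_x(n0, sinal):
--     value = 1 if sinal == 1 else -1
--     zeros = max(0, min(111, n0 + 10))
--     return [0] * zeros + [value] * (111 - zeros)
-- ===== Notes on version B (the rewrite author's own statement) =====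
-- stated objective: simpler
-- what changed: Replaces the per-element loop with a closed-form boundary computation: count of leading zeros is clamp(n0+10, 0, 111), then the list is built from two replicated blocks.
import Mathlib
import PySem

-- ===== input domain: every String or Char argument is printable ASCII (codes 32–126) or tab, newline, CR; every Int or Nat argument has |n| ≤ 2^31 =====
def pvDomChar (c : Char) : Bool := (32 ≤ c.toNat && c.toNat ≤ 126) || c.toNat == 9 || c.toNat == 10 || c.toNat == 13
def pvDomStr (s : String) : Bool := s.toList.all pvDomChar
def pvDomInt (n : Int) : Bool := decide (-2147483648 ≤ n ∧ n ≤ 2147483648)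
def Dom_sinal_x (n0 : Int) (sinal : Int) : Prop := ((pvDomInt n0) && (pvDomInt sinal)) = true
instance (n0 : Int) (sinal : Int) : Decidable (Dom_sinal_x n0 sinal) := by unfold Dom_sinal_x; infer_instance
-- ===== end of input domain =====

-- B replaces A's per-element loop by a closed-form boundary: clamp(n0+10,0,111) zeros then a replicated block (simpler).

-- ===== PORT A =====
-- A: iterate i over range(-10, 101), appending 0 below n0 and ±1 (by sinal) from n0 on.
def sinal_x (n0 : Int) (sinal : Int) : List Int :=
  (PySem.List.pyRange (-10) 101 1).foldl
    (fun u i =>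
      if i ≥ n0 then
        if sinal = 1 then u ++ [1] else u ++ [-1]
      else u ++ [0]) []

-- ===== PORT B =====
def sinal_x_alt (n0 : Int) (sinal : Int) : List Int :=
  let value : Int := if sinal = 1 then 1 else -1
  let zeros : Int := max 0 (min 111 (n0 + 10))
  List.replicate zeros.toNat 0 ++ List.replicate (111 - zeros).toNat value

-- ===== PRECONDITION & SPEC =====
def Spec_sinal_x (n0 : Int) (sinal : Int) (out : List Int) : Prop := out = sinal_x_alt n0 sinal
instance (n0 : Int) (sinal : Int) (out : List Int) : Decidable (Spec_sinal_x n0 sinal out) := by unfold Spec_sinal_x; infer_instance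

-- ===== CLAIM (what is proved, stated in full; the proofs are below) =====
def Claim_equal_sinal_x : Prop := ∀ (n0 : Int) (sinal : Int), Dom_sinal_x n0 sinal → Spec_sinal_x n0 sinal (sinal_x n0 sinal)

-- ===== LEMMAS AND PROOFS =====

theorem sinal_x_as_map (n0 sinal : Int) :
    sinal_x n0 sinal
      = (List.range 111).map
          (fun k : Nat => if n0 ≤ -10 + (k : Int) then (if sinal = 1 then (1 : Int) else -1) else 0) := by
  unfold sinal_x
  have hfun : (fun (u : List Int) (i : Int) =>
      if i ≥ n0 then (if sinal = 1 then u ++ [1] else u ++ [-1]) else u ++ [0])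
      = (fun (u : List Int) (i : Int) =>
          u ++ [if n0 ≤ i then (if sinal = 1 then (1 : Int) else -1) else 0]) := by
    funext u i
    by_cases h1 : n0 ≤ i <;> by_cases h2 : sinal = 1 <;> simp [h1, h2, ge_iff_le]
  rw [hfun, PySem.List.foldl_append_singleton_eq_map, PySem.List.pyRange_one]
  have h111 : ((101 : Int) - (-10)).toNat = 111 := rfl
  rw [h111, List.map_map, List.nil_append]
  rfl

theorem sinal_x_spec : Claim_equal_sinal_x := by
  intro n0 sinal _
  unfold Spec_sinal_x sinal_x_alt
  rw [sinal_x_as_map]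
  dsimp only
  set v : Int := if sinal = 1 then 1 else -1 with hv
  set z : Int := max 0 (min 111 (n0 + 10)) with hz
  have hz0 : 0 ≤ z := le_max_left _ _
  have hz111 : z ≤ 111 := by simp [hz]
  apply List.ext_getElem
  · simp
    omega
  · intro k hk hk'
    have hk111 : k < 111 := by simpa using hk
    rw [List.getElem_map, List.getElem_range]
    by_cases hlt : k < z.toNat
    · rw [List.getElem_append_left (by simpa using hlt)]
      rw [List.getElem_replicate]
      have : ¬ n0 ≤ -10 + (k : Int) := by omega
      simp [this]
    · rw [List.getElem_append_right (by simpa using hlt)]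
      rw [List.getElem_replicate]
      have : n0 ≤ -10 + (k : Int) := by omega
      simp [this]

-- ===== VERDICT (by name: the statement is the Claim_ definition above) =====
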